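-- pv_equiv track=rewrite | github.com/qcymkxyc/Image-Process | src/chapter11/freeman_code.py | __get_freeman_code
-- ===== SOURCE A (Python) =====
-- def __get_freeman_code_by_two_point(
--         point1: (int, int), point2: (int, int),) -> int:
--     """给定两个点（Freeman点），返回Freeman编码
--
--     :param point1: (int,int),点1
--     :param point2: (int,int),点2
--     :return: int， Freeman编码
--     """
--     freeman_code_dict = {
--         str((1, 0)): 0,
--         str((1, 1)): 1,
--         str((0, 1)): 2,
--         str((-1, 1)): 3,
--         str((-1, 0)): 4,
--         str((-1, -1)): 5,
--         str((0, -1)): 6,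
--         str((1, -1)): 7,
--     }
--     point_gap = (point2[0] - point1[0], point2[1] - point1[1])
--     try:
--         return freeman_code_dict[str(point_gap)]
--     except KeyError:
--         return
--
-- def __get_freeman_code(freeman_coordination_list: [(int, int)]) -> [int]:
--     """给定Freeman坐标，返回Freeman编码的结果
--
--     :param freeman_coordination_list: List[(int,int)],Freman坐标组成的List
--     :return: List[int],Freeman编码结果
--     """
--     freeman_code_list = list()
--     for i in range(len(freeman_coordination_list) - 1):
--         current_freeman_point = freeman_coordination_list[i]
--         next_freeman_point = freeman_coordination_list[i + 1]
--
--         freeman_code = __get_freeman_code_by_two_point(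
--             point1=current_freeman_point,
--             point2=next_freeman_point)
--         '''排除重复点 '''
--         if freeman_code is not None:
--             freeman_code_list.append(freeman_code)
--     return freeman_code_list
-- ===== SOURCE B (Python) =====
-- _TABLE = (
--     (5, 4, 3),      # dx == -1 : dy = -1, 0, 1
--     (6, None, 2),   # dx ==  0
--     (7, 0, 1),      # dx ==  1
-- )
--
--
-- def __get_freeman_code(freeman_coordination_list):
--     def go(points):
--         if len(points) < 2:
--             return []
--         (x1, y1), (x2, y2) = points[0], points[1]
--         rest = go(points[1:])
--         dx, dy = x2 - x1, y2 - y1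
--         if -1 <= dx <= 1 and -1 <= dy <= 1:
--             code = _TABLE[dx + 1][dy + 1]
--             if code is not None:
--                 return [code] + rest
--         return rest
--     return go(freeman_coordination_list)
-- ===== Notes on version B (the rewrite author's own statement) =====
-- stated objective: alternative
-- what changed: B replaces A's index loop with string-keyed dict lookups and try/except by a structural recursion over the point list that builds the result front-to-back by consing, reading each code from a precomputed 3x3 table indexed by (dx+1, dy+1).
import Mathlib
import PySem

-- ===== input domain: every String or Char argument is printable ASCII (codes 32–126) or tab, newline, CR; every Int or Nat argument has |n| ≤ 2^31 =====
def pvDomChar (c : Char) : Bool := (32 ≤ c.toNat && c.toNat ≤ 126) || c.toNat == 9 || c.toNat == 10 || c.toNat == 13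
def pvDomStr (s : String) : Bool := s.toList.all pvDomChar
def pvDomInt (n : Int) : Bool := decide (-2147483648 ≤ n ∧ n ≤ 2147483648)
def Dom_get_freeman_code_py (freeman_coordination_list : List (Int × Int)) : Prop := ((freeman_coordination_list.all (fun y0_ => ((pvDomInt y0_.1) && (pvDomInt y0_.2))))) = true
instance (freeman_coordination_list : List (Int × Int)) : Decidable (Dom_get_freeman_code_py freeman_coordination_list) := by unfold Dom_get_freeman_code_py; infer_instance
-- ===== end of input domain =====

-- ===== PORT A =====
-- B replaces A's index loop + string-keyed dict helper by a structural recursion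
-- over the point list with a precomputed 3x3 table (objective: alternative).
-- Python str keys like str((1, 0)) are ported as their character lists (exact on this domain).

-- str((a, b)) in Python: "(a, b)"
def pvStrPair (p : Int × Int) : List Char :=
  '(' :: (PySem.Int.toChars p.1 ++ ',' :: ' ' :: (PySem.Int.toChars p.2 ++ [')']))

-- the freeman_code_dict literal of __get_freeman_code_by_two_point
def pvCodeDict : PySem.Dict (List Char) Int :=
  PySem.Dict.ofList [(pvStrPair (1, 0), 0), (pvStrPair (1, 1), 1), (pvStrPair (0, 1), 2),
    (pvStrPair (-1, 1), 3), (pvStrPair (-1, 0), 4), (pvStrPair (-1, -1), 5),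
    (pvStrPair (0, -1), 6), (pvStrPair (1, -1), 7)]

-- __get_freeman_code_by_two_point: dict lookup; KeyError -> None (none)
def get_freeman_code_by_two_point (point1 point2 : Int × Int) : Option Int :=
  let point_gap : Int × Int := (point2.1 - point1.1, point2.2 - point1.2)
  PySem.Dict.get? pvCodeDict (pvStrPair point_gap)

def get_freeman_code_py (freeman_coordination_list : List (Int × Int)) : List Int :=
  (PySem.List.pyRange 0 ((freeman_coordination_list.length : Int) - 1) 1).foldl
    (fun acc i =>
      let current_freeman_point := PySem.List.pyGetD freeman_coordination_list i (0, 0)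
      let next_freeman_point := PySem.List.pyGetD freeman_coordination_list (i + 1) (0, 0)
      match get_freeman_code_by_two_point current_freeman_point next_freeman_point with
      | some c => acc ++ [c]
      | none => acc) []

-- ===== PORT B =====
-- _TABLE, indexed [dx+1][dy+1]
def pvTable : List (List (Option Int)) :=
  [[some 5, some 4, some 3], [some 6, none, some 2], [some 7, some 0, some 1]]

-- the inner recursive helper 'go' of Source B
def pvFreemanGo : List (Int × Int) → List Int
  | [] => []
  | [_] => []
  | p :: q :: t =>
    let rest := pvFreemanGo (q :: t)
    let dx := q.1 - p.1
    let dy := q.2 - p.2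
    if -1 ≤ dx ∧ dx ≤ 1 ∧ -1 ≤ dy ∧ dy ≤ 1 then
      match PySem.List.pyGetD (PySem.List.pyGetD pvTable (dx + 1) []) (dy + 1) none with
      | some code => code :: rest
      | none => rest
    else rest

def get_freeman_code_py_alt (freeman_coordination_list : List (Int × Int)) : List Int :=
  pvFreemanGo freeman_coordination_list

-- ===== PRECONDITION & SPEC =====
def Spec_get_freeman_code_py (freeman_coordination_list : List (Int × Int)) (out : List Int) : Prop := out = get_freeman_code_py_alt freeman_coordination_list
instance (freeman_coordination_list : List (Int × Int)) (out : List Int) : Decidable (Spec_get_freeman_code_py freeman_coordination_list out) := by unfold Spec_get_freeman_code_py; infer_instance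

-- ===== CLAIM (what is proved, stated in full; the proofs are below) =====
def Claim_equal_get_freeman_code_py : Prop := ∀ (freeman_coordination_list : List (Int × Int)), Dom_get_freeman_code_py freeman_coordination_list → Spec_get_freeman_code_py freeman_coordination_list (get_freeman_code_py freeman_coordination_list)

-- ===== LEMMAS AND PROOFS =====

-- every character of Nat.toDigits 10 m is a decimal digit ('0'..'9', codes 48..57)
lemma pv_td_digits (m : Nat) : ∀ c ∈ Nat.toDigits 10 m, 48 ≤ c.toNat ∧ c.toNat ≤ 57 := by
  induction m using Nat.strong_induction_on with
  | _ m ih =>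
    rw [Nat.toDigits_eq_if (by norm_num)]
    split
    · rename_i hm
      intro c hc
      simp only [List.mem_singleton] at hc
      subst hc
      interval_cases m <;> decide
    · rename_i hm
      intro c hc
      rcases List.mem_append.1 hc with h | h
      · exact ih (m / 10) (by omega) c h
      · simp only [List.mem_singleton] at h
        subst h
        have hr : m % 10 < 10 := Nat.mod_lt _ (by norm_num)
        set r := m % 10 with hrdef
        interval_cases r <;> decide

lemma pv_td_ne_nil (m : Nat) : Nat.toDigits 10 m ≠ [] := by
  rw [Nat.toDigits_eq_if (by norm_num)]
  split <;> simp

lemma pv_digitChar_inj (a b : Nat) (ha : a < 10) (hb : b < 10) (h : a.digitChar = b.digitChar) : a = b := by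
  interval_cases a <;> interval_cases b <;> first | rfl | (exact absurd h (by decide))

lemma pv_td_inj (m : Nat) : ∀ k, Nat.toDigits 10 m = Nat.toDigits 10 k → m = k := by
  induction m using Nat.strong_induction_on with
  | _ m ih =>
    intro k h
    rw [Nat.toDigits_eq_if (n := m) (by norm_num)] at h
    rw [Nat.toDigits_eq_if (n := k) (by norm_num)] at h
    split at h <;> split at h
    · exact pv_digitChar_inj _ _ (by assumption) (by assumption) (List.singleton_inj.1 h)
    · exfalso
      have h1 := congrArg List.length h
      have := pv_td_ne_nil (k / 10)
      simp [List.length_append] at h1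
      exact this h1
    · exfalso
      have h1 := congrArg List.length h
      have := pv_td_ne_nil (m / 10)
      simp [List.length_append] at h1
      exact this h1
    · rename_i hm hk
      have := List.append_inj' h (by simp)
      have h1 : m / 10 = k / 10 := ih (m / 10) (by omega) _ this.1
      have h2 : m % 10 = k % 10 := by
        apply pv_digitChar_inj _ _ (Nat.mod_lt _ (by norm_num)) (Nat.mod_lt _ (by norm_num))
        exact List.singleton_inj.1 this.2
      omega

lemma pv_td_head_ne_minus (m : Nat) (c : Char) (t : List Char)
    (hm : Nat.toDigits 10 m = c :: t) : c ≠ '-' := by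
  intro hcontra
  have := pv_td_digits m c (by rw [hm]; exact List.mem_cons_self)
  subst hcontra; revert this; decide

lemma pv_toChars_no_comma (n : Int) : ∀ c ∈ PySem.Int.toChars n, c ≠ ',' := by
  intro c hc
  unfold PySem.Int.toChars at hc
  split at hc
  · rcases List.mem_cons.1 hc with h | h
    · subst h; decide
    · have := pv_td_digits _ _ h
      intro hcomma; subst hcomma; revert this; decide
  · have := pv_td_digits _ _ hc
    intro hcomma; subst hcomma; revert this; decide

lemma pv_toChars_inj (a b : Int) (h : PySem.Int.toChars a = PySem.Int.toChars b) : a = b := by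
  unfold PySem.Int.toChars at h
  split at h <;> split at h
  · rename_i ha hb
    have := pv_td_inj _ _ (List.cons.inj h).2
    omega
  · rename_i ha hb
    exfalso
    obtain ⟨c, t, hct⟩ := List.exists_cons_of_ne_nil (pv_td_ne_nil b.toNat)
    rw [hct] at h
    exact pv_td_head_ne_minus _ _ _ hct (List.cons.inj h).1.symm
  · rename_i ha hb
    exfalso
    obtain ⟨c, t, hct⟩ := List.exists_cons_of_ne_nil (pv_td_ne_nil a.toNat)
    rw [hct] at h
    exact pv_td_head_ne_minus _ _ _ hct (List.cons.inj h).1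
  · rename_i ha hb
    have := pv_td_inj _ _ h
    omega

lemma pv_split_comma (s : List Char) : ∀ (t u v : List Char), (∀ c ∈ s, c ≠ ',') → (∀ c ∈ t, c ≠ ',') →
    s ++ ',' :: u = t ++ ',' :: v → s = t ∧ u = v := by
  induction s with
  | nil =>
    intro t u v _ ht h
    cases t with
    | nil => simpa using h
    | cons a t' =>
      exfalso
      have := (List.cons.inj h).1
      exact ht a List.mem_cons_self this.symm
  | cons a s' ih =>
    intro t u v hs ht h
    cases t with
    | nil =>
      exfalso
      have := (List.cons.inj h).1
      exact hs a List.mem_cons_self this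
    | cons b t' =>
      obtain ⟨h1, h2⟩ := List.cons.inj h
      obtain ⟨h3, h4⟩ := ih t' u v (fun c hc => hs c (List.mem_cons_of_mem _ hc))
        (fun c hc => ht c (List.mem_cons_of_mem _ hc)) h2
      exact ⟨by rw [h1, h3], h4⟩

lemma pv_strPair_iff (p q : Int × Int) : pvStrPair p = pvStrPair q ↔ p = q := by
  constructor
  · intro h
    unfold pvStrPair at h
    have h2 := (List.cons.inj h).2
    obtain ⟨h3, h4⟩ := pv_split_comma _ _ _ _ (pv_toChars_no_comma p.1) (pv_toChars_no_comma q.1) h2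
    have h5 := (List.cons.inj h4).2
    have h6 : PySem.Int.toChars p.2 = PySem.Int.toChars q.2 := (List.append_inj' h5 (by simp)).1
    have := pv_toChars_inj _ _ h3
    have := pv_toChars_inj _ _ h6
    exact Prod.ext (by assumption) (by assumption)
  · intro h; rw [h]

lemma pv_dict_eq : pvCodeDict = PySem.Dict.mk
    [(pvStrPair (1, 0), 0), (pvStrPair (1, 1), 1), (pvStrPair (0, 1), 2),
     (pvStrPair (-1, 1), 3), (pvStrPair (-1, 0), 4), (pvStrPair (-1, -1), 5),
     (pvStrPair (0, -1), 6), (pvStrPair (1, -1), 7)] := by decide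

-- A's helper, characterised as a case table on the gap
lemma pv_helper_char (p q : Int × Int) :
    get_freeman_code_by_two_point p q =
      (if (1 : Int) = q.1 - p.1 ∧ (0 : Int) = q.2 - p.2 then some 0
       else if (1 : Int) = q.1 - p.1 ∧ (1 : Int) = q.2 - p.2 then some 1
       else if (0 : Int) = q.1 - p.1 ∧ (1 : Int) = q.2 - p.2 then some 2
       else if (-1 : Int) = q.1 - p.1 ∧ (1 : Int) = q.2 - p.2 then some 3
       else if (-1 : Int) = q.1 - p.1 ∧ (0 : Int) = q.2 - p.2 then some 4
       else if (-1 : Int) = q.1 - p.1 ∧ (-1 : Int) = q.2 - p.2 then some 5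
       else if (0 : Int) = q.1 - p.1 ∧ (-1 : Int) = q.2 - p.2 then some 6
       else if (1 : Int) = q.1 - p.1 ∧ (-1 : Int) = q.2 - p.2 then some 7
       else none) := by
  unfold get_freeman_code_by_two_point
  rw [pv_dict_eq]
  simp only [PySem.Dict.get?_mk_cons, beq_iff_eq, pv_strPair_iff, Prod.mk.injEq]
  rfl

-- B's guarded table lookup computes the same Option as A's helper
lemma pv_table_eq (p q : Int × Int) :
    (if -1 ≤ q.1 - p.1 ∧ q.1 - p.1 ≤ 1 ∧ -1 ≤ q.2 - p.2 ∧ q.2 - p.2 ≤ 1 then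
       PySem.List.pyGetD (PySem.List.pyGetD pvTable (q.1 - p.1 + 1) []) (q.2 - p.2 + 1) none
     else none) = get_freeman_code_by_two_point p q := by
  rw [pv_helper_char]
  set a := q.1 - p.1 with ha
  set b := q.2 - p.2 with hb
  by_cases h : -1 ≤ a ∧ a ≤ 1 ∧ -1 ≤ b ∧ b ≤ 1
  · obtain ⟨h1, h2, h3, h4⟩ := h
    rw [if_pos ⟨h1, h2, h3, h4⟩]
    interval_cases a <;> interval_cases b <;> decide
  · rw [if_neg h]
    have h1 : ¬((1 : Int) = a ∧ (0 : Int) = b) := by rintro ⟨e1, e2⟩; exact h (by omega)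
    have h2 : ¬((1 : Int) = a ∧ (1 : Int) = b) := by rintro ⟨e1, e2⟩; exact h (by omega)
    have h3 : ¬((0 : Int) = a ∧ (1 : Int) = b) := by rintro ⟨e1, e2⟩; exact h (by omega)
    have h4 : ¬((-1 : Int) = a ∧ (1 : Int) = b) := by rintro ⟨e1, e2⟩; exact h (by omega)
    have h5 : ¬((-1 : Int) = a ∧ (0 : Int) = b) := by rintro ⟨e1, e2⟩; exact h (by omega)
    have h6 : ¬((-1 : Int) = a ∧ (-1 : Int) = b) := by rintro ⟨e1, e2⟩; exact h (by omega)
    have h7 : ¬((0 : Int) = a ∧ (-1 : Int) = b) := by rintro ⟨e1, e2⟩; exact h (by omega)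
    have h8 : ¬((1 : Int) = a ∧ (-1 : Int) = b) := by rintro ⟨e1, e2⟩; exact h (by omega)
    simp only [h1, h2, h3, h4, h5, h6, h7, h8, if_false]

lemma pv_map_range_pairs (xs : List (Int × Int)) :
    (List.range (xs.length - 1)).map
        (fun i => (xs.getD i ((0 : Int), (0 : Int)), xs.getD (i + 1) ((0 : Int), (0 : Int))))
      = xs.zip xs.tail := by
  apply List.ext_getElem
  · simp [List.length_zip, List.length_tail]
  · intro i h1 h2
    simp only [List.getElem_map, List.getElem_range, List.getElem_zip, List.getElem_tail]
    simp only [List.length_map, List.length_range] at h1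
    rw [List.getD_eq_getElem _ _ (by omega), List.getD_eq_getElem _ _ (by omega)]

-- A's index loop, re-expressed as a fold over consecutive pairs
lemma pv_A_as_zip (xs : List (Int × Int)) :
    get_freeman_code_py xs =
      (xs.zip xs.tail).foldl
        (fun acc pq =>
          match get_freeman_code_by_two_point pq.1 pq.2 with
          | some c => acc ++ [c]
          | none => acc) [] := by
  unfold get_freeman_code_py
  cases xs with
  | nil => rfl
  | cons p t =>
    have hlen : (((p :: t).length : Int) - 1) = (((p :: t).length - 1 : Nat) : Int) := by
      simp
    rw [hlen, PySem.List.pyRange_zero_natCast, List.foldl_map]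
    rw [← pv_map_range_pairs (p :: t), List.foldl_map]
    congr 1
    funext acc i
    show (match get_freeman_code_by_two_point (PySem.List.pyGetD (p :: t) (↑i) (0, 0))
        (PySem.List.pyGetD (p :: t) ((↑i : Int) + 1) (0, 0)) with
      | some c => acc ++ [c]
      | none => acc) = _
    rw [show ((↑i : Int) + 1) = ((i + 1 : Nat) : Int) from by push_cast; ring,
        PySem.List.pyGetD_natCast, PySem.List.pyGetD_natCast]

-- generic: A's appending fold is a filterMap
lemma pv_foldl_filterMap {α : Type} (f : α → Option Int) (l : List α) (acc : List Int) :
    l.foldl (fun acc x => match f x with | some c => acc ++ [c] | none => acc) acc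
      = acc ++ l.filterMap f := by
  induction l generalizing acc with
  | nil => simp
  | cons x l ih =>
    simp only [List.foldl_cons, List.filterMap_cons]
    cases f x <;> simp [ih]

-- B's recursion is the same filterMap over consecutive pairs
lemma pv_B_filterMap (xs : List (Int × Int)) :
    pvFreemanGo xs = (xs.zip xs.tail).filterMap
      (fun pq => get_freeman_code_by_two_point pq.1 pq.2) := by
  induction xs with
  | nil => rfl
  | cons p t ih =>
    cases t with
    | nil => rfl
    | cons q u =>
      show pvFreemanGo (p :: q :: u) = _
      rw [pvFreemanGo]
      simp only [List.tail_cons, List.zip_cons_cons, List.filterMap_cons] at ih ⊢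
      rw [← ih, ← pv_table_eq p q]
      by_cases h : -1 ≤ q.1 - p.1 ∧ q.1 - p.1 ≤ 1 ∧ -1 ≤ q.2 - p.2 ∧ q.2 - p.2 ≤ 1
      · rw [if_pos h, if_pos h]
        cases PySem.List.pyGetD (PySem.List.pyGetD pvTable (q.1 - p.1 + 1) []) (q.2 - p.2 + 1) none <;> rfl
      · rw [if_neg h, if_neg h]

-- ===== VERDICT (by name: the statement is the Claim_ definition above) =====
theorem get_freeman_code_py_spec : Claim_equal_get_freeman_code_py := by
  intro xs _
  show get_freeman_code_py xs = get_freeman_code_py_alt xs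
  rw [pv_A_as_zip, get_freeman_code_py_alt, pv_B_filterMap, pv_foldl_filterMap]
  simp
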